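-- pv_equiv track=rewrite | github.com/fanglab/6mASCOPE | SLpackage/private/pacbio/pythonpkgs/pbcoretools/lib/python2.7/site-packages/pbcoretools/pbvalidate/utils.py | _get_validation_error_lines
-- ===== SOURCE A (Python) =====
-- from collections import defaultdict
--
-- def iter_non_redundant_errors(errors):
--     """
--     Iterate over errors, skipping any that are judged to be duplicates
--     based on their hashes.  Yields a tuple comprised of a 'unique' error
--     and the number of occurences.
--     """
--     counts = defaultdict(int)
--     for error in errors:
--         counts[error] += 1
--     displayed = set([])
--     for error in errors:
--         if (not error in displayed):
--             displayed.add(error)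
--             yield error, counts[error]
--
-- def _get_validation_error_lines(errors, verbose=False):
--     if (len(errors) == 0):
--         yield "(no spec violations detected)"
--     else:
--         yield "%d spec violation(s) detected:" % len(errors)
--     if verbose:
--         for error in errors:
--             yield str(error)
--     else:
--         for error, n_error in iter_non_redundant_errors(errors):
--             yield "  " + str(error)
--             if (n_error > 1):
--                 yield "    [%d similar error(s) not displayed]" % (n_error - 1)
-- ===== SOURCE B (Python) =====
-- def _get_validation_error_lines(errors, verbose=False):
--     if len(errors) == 0:
--         yield "(no spec violations detected)"
--     else:
--         yield "%d spec violation(s) detected:" % len(errors)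
--     if verbose:
--         for error in errors:
--             yield str(error)
--     else:
--         # No counting table and no seen-set: peel off the first remaining
--         # error, drop all its duplicates by filtering, and read the count
--         # off the length difference.
--         rest = list(errors)
--         while rest:
--             error = rest[0]
--             remaining = [e for e in rest[1:] if e != error]
--             n_error = len(rest) - len(remaining)
--             yield "  " + str(error)
--             if n_error > 1:
--                 yield "    [%d similar error(s) not displayed]" % (n_error - 1)
--             rest = remaining
-- ===== Notes on version B (the rewrite author's own statement) =====
-- stated objective: alternative
-- what changed: Replaced A's two-pass table-based dedup (a defaultdict counting pass plus a second scan over errors guarded by a 'displayed' set) with a table-free peel-and-filter worklist loop: emit the first remaining error, filter its duplicates out of the worklist, and obtain its count from the length difference.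
import Mathlib
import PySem

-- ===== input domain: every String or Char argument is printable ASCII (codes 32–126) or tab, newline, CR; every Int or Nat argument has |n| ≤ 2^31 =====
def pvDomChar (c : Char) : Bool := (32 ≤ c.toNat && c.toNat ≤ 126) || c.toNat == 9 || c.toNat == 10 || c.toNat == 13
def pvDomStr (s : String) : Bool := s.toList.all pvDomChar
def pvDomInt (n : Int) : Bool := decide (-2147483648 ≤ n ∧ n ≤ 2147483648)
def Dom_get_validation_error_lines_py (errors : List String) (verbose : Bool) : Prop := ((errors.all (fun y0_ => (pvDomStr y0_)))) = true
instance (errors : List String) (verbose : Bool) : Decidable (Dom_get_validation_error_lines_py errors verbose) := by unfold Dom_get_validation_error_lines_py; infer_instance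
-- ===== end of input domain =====

-- B replaces A's dedup helper (a counting-dict pass plus a second scan over errors guarded
-- by a 'displayed' set) with a peel-and-filter loop that keeps no table at all: it emits the
-- first remaining error, filters its duplicates out of the worklist, and reads the count off
-- the length difference (objective: alternative).

-- ===== PORT A =====
-- iter_non_redundant_errors: counts = defaultdict pass, then second scan over errors with 'displayed' set
def pvIterNonRedundant (errors : List String) : List (String × Int) :=
  let counts : PySem.Dict String Int :=
    errors.foldl (fun d e => d.modify e 0 (· + 1)) PySem.Dict.empty
  (errors.foldl
    (fun (st : PySem.Set String × List (String × Int)) e =>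
      if PySem.Set.contains st.1 e then st
      else (PySem.Set.add st.1 e, st.2 ++ [(e, counts.getD e 0)]))
    (PySem.Set.ofList [], [])).2

def get_validation_error_lines_py (errors : List String) (verbose : Bool) : List String :=
  (if errors.length = 0 then ["(no spec violations detected)"]
   else [PySem.Int.toStr (errors.length : Int) ++ " spec violation(s) detected:"]) ++
  (if verbose then errors.map (fun e => e)
   else (pvIterNonRedundant errors).foldl
     (fun acc p =>
       acc ++ (["  " ++ p.1] ++
         (if p.2 > 1 then
            ["    [" ++ PySem.Int.toStr (p.2 - 1) ++ " similar error(s) not displayed]"]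
          else [])))
     [])

-- ===== PORT B =====
-- Source B's while loop: error = rest[0]; remaining = [e for e in rest[1:] if e != error];
-- n_error = len(rest) - len(remaining); rest = remaining.  No dict and no set.
def pvPeelLoop : List String → List String
  | [] => []
  | e :: rest =>
    let remaining := rest.filter (fun x => !(x == e))
    let n : Int := ((e :: rest).length : Int) - (remaining.length : Int)
    ("  " ++ e) ::
      ((if n > 1 then
          ["    [" ++ PySem.Int.toStr (n - 1) ++ " similar error(s) not displayed]"]
        else []) ++ pvPeelLoop remaining)
termination_by l => l.length
decreasing_by
  rw [List.length_unattach, List.length_cons]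
  exact Nat.lt_succ_of_le (le_trans (List.length_filter_le _ _) (le_of_eq List.length_attach))

def get_validation_error_lines_py_alt (errors : List String) (verbose : Bool) : List String :=
  (if errors.length = 0 then ["(no spec violations detected)"]
   else [PySem.Int.toStr (errors.length : Int) ++ " spec violation(s) detected:"]) ++
  (if verbose then errors.map (fun e => e)
   else pvPeelLoop errors)

-- ===== PRECONDITION & SPEC =====
def Spec_get_validation_error_lines_py (errors : List String) (verbose : Bool) (out : List String) : Prop := out = get_validation_error_lines_py_alt errors verbose
instance (errors : List String) (verbose : Bool) (out : List String) : Decidable (Spec_get_validation_error_lines_py errors verbose out) := by unfold Spec_get_validation_error_lines_py; infer_instance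

-- ===== CLAIM (what is proved, stated in full; the proofs are below) =====
def Claim_equal_get_validation_error_lines_py : Prop := ∀ (errors : List String) (verbose : Bool), Dom_get_validation_error_lines_py errors verbose → Spec_get_validation_error_lines_py errors verbose (get_validation_error_lines_py errors verbose)

-- ===== LEMMAS AND PROOFS =====

-- A's second scan (displayed set + yields) is a map of f over the first-occurrence dedup.
theorem pvDisplayedLoop {α : Type} (f : String → α) :
    ∀ (l : List String) (s : PySem.Set String),
      l.foldl
        (fun (st : PySem.Set String × List α) e =>
          if PySem.Set.contains st.1 e then st
          else (PySem.Set.add st.1 e, st.2 ++ [f e]))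
        (s, s.map f)
      = (PySem.Set.update s l, (PySem.Set.update s l).map f) := by
  intro l
  induction l with
  | nil => intro s; simp [PySem.Set.update]
  | cons e l ih =>
    intro s
    rw [PySem.Set.update_cons]
    by_cases h : e ∈ s
    · have hc : PySem.Set.contains s e = true := (PySem.Set.contains_iff s e).mpr h
      simp only [List.foldl_cons, hc, if_true]
      rw [PySem.Set.add_of_mem h]
      exact ih s
    · have hc : PySem.Set.contains s e = false := by
        cases hcc : PySem.Set.contains s e
        · rfl
        · exact absurd ((PySem.Set.contains_iff s e).mp hcc) h
      simp only [List.foldl_cons, hc]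
      have : (s.map f) ++ [f e] = (PySem.Set.add s e).map f := by
        rw [PySem.Set.add_of_not_mem h, List.map_append]; rfl
      rw [this]
      exact ih (PySem.Set.add s e)

theorem pvIterNonRedundant_eq (errors : List String) :
    pvIterNonRedundant errors
      = (PySem.Set.ofList errors).map (fun e => (e, (errors.count e : Int))) := by
  unfold pvIterNonRedundant
  have hctr : errors.foldl (fun d e => d.modify e 0 (· + 1)) PySem.Dict.empty
      = PySem.Dict.counter errors := (PySem.Dict.counter_eq_foldl errors).symm
  simp only [hctr]
  have : ((PySem.Set.ofList ([] : List String) : PySem.Set String),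
          ([] : List (String × Int)))
      = ((PySem.Set.ofList [] : PySem.Set String),
         (PySem.Set.ofList ([] : List String)).map
           (fun e => (e, (PySem.Dict.counter errors).getD e 0))) := rfl
  rw [this, pvDisplayedLoop (fun e => (e, (PySem.Dict.counter errors).getD e 0)) errors]
  simp [PySem.Set.update_nil_left, PySem.Dict.getD_counter]

-- removed duplicates + kept count = original length
theorem pvLenFilterCount (l : List String) (e : String) :
    (l.filter (fun y => !(y == e))).length + l.count e = l.length := by
  induction l with
  | nil => simp
  | cons a l ih =>
    by_cases h : a = e
    · subst h; simp; omega
    · simp [List.filter_cons, h]; omega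

-- first-occurrence dedup commutes with filtering
theorem pvOfListFilter (p : String → Bool) :
    ∀ (l : List String),
      PySem.Set.ofList (l.filter p) = (PySem.Set.ofList l).filter p := by
  intro l
  induction l with
  | nil => simp [PySem.Set.ofList_nil]
  | cons a l ih =>
    by_cases h : p a = true
    · rw [List.filter_cons_of_pos h, PySem.Set.ofList_cons, PySem.Set.ofList_cons,
          List.filter_cons_of_pos h]
      simp only [PySem.Set.discard, ih, List.filter_filter]
      congr 1
      apply List.filter_congr
      intro x _
      rw [Bool.and_comm]
    · rw [List.filter_cons_of_neg h, PySem.Set.ofList_cons,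
          List.filter_cons_of_neg h, ih]
      simp only [PySem.Set.discard, List.filter_filter]
      apply List.filter_congr
      intro x _
      by_cases hx : x = a
      · subst hx; simp [h]
      · simp [hx]

-- B's peel loop renders exactly the first-occurrence dedup with its counts
theorem pvPeelLoop_eq :
    ∀ (l : List String),
      pvPeelLoop l
        = ((PySem.Set.ofList l).map (fun e => (e, (l.count e : Int)))).flatMap
            (fun p =>
              ["  " ++ p.1] ++
                (if p.2 > 1 then
                   ["    [" ++ PySem.Int.toStr (p.2 - 1) ++ " similar error(s) not displayed]"]
                 else [])) := by
  intro l
  induction l using pvPeelLoop.induct with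
  | case1 => simp [pvPeelLoop, PySem.Set.ofList_nil]
  | case2 e rest remaining ih =>
    have hrem : remaining = rest.filter (fun x => !(x == e)) := by
      simp only [remaining]
      rw [List.unattach_filter (g := fun x => !(x == e)) (hf := fun x h => rfl),
          List.unattach_attach]
    rw [hrem] at ih
    rw [pvPeelLoop]
    rw [PySem.Set.ofList_cons, List.map_cons, List.flatMap_cons]
    simp only [List.unattach_filter]
    have hco : (((e :: rest).count e : Int))
        = ((e :: rest).length : Int) - ((rest.filter (fun x => !(x == e))).length : Int) := by
      have h1 := pvLenFilterCount rest e
      have h2 : (e :: rest).count e = rest.count e + 1 := by simp [List.count_cons]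
      simp only [h2, List.length_cons]
      push_cast
      omega
    have hdisc : (PySem.Set.ofList rest).discard e
        = PySem.Set.ofList (rest.filter (fun x => !(x == e))) := by
      rw [pvOfListFilter]; rfl
    have hmap : (PySem.Set.ofList (rest.filter (fun x => !(x == e)))).map
          (fun x => (x, ((rest.filter (fun y => !(y == e))).count x : Int)))
        = (PySem.Set.ofList (rest.filter (fun x => !(x == e)))).map
          (fun x => (x, ((e :: rest).count x : Int))) := by
      apply List.map_congr_left
      intro x hx
      have hxr : x ∈ rest.filter (fun y => !(y == e)) := (PySem.Set.mem_ofList _ _).mp hx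
      have hxe : x ≠ e := by
        have := List.of_mem_filter hxr
        simpa using this
      have hpc : (rest.filter (fun y => !(y == e))).count x = rest.count x :=
        List.count_filter (by simpa using hxe)
      rw [hpc]
      simp [Ne.symm hxe]
    rw [ih, hmap, hdisc, ← hco]
    simp

-- ===== VERDICT (by name: the statement is the Claim_ definition above) =====
theorem get_validation_error_lines_py_spec : Claim_equal_get_validation_error_lines_py := by
  intro errors verbose _
  unfold Spec_get_validation_error_lines_py
  unfold get_validation_error_lines_py get_validation_error_lines_py_alt
  cases verbose with
  | true => simp
  | false =>
    simp only [Bool.false_eq_true, if_false]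
    congr 1
    rw [pvIterNonRedundant_eq,
        PySem.List.foldl_append_eq_flatMap, List.nil_append,
        pvPeelLoop_eq]
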